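-- pv_equiv track=rewrite | github.com/siddhantkushwaha/Sudoku-AI | cv_utils.py | find_corners_from_contour
-- ===== SOURCE A (Python) =====
-- import operator
--
-- def find_corners_from_contour(polygon):
--     # Finds the 4 extreme corners of the contour given.
--
--     # Use of `operator.itemgetter` with `max` and `min` allows us to get the index of the point
--     # Each point is an array of 1 coordinate, hence the [0] getter, then [0] or [1] used to get x and y respectively.
--
--     # Bottom-right point has the largest (x + y) value
--     # Top-left has point smallest (x + y) value
--     # Bottom-left point has smallest (x - y) value
--     # Top-right point has largest (x - y) value
--
--     bottom_right, _ = max(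
--         enumerate([pt[0][0] + pt[0][1] for pt in polygon]), key=operator.itemgetter(1))
--     top_left, _ = min(enumerate([pt[0][0] + pt[0][1]
--                                  for pt in polygon]), key=operator.itemgetter(1))
--     bottom_left, _ = min(enumerate([pt[0][0] - pt[0][1]
--                                     for pt in polygon]), key=operator.itemgetter(1))
--     top_right, _ = max(enumerate([pt[0][0] - pt[0][1]
--                                   for pt in polygon]), key=operator.itemgetter(1))
--
--     # Return an array of all 4 points using the indices
--     # Each point is in its own array of one coordinate
--     return [polygon[top_left][0], polygon[top_right][0], polygon[bottom_right][0], polygon[bottom_left][0]]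
-- ===== SOURCE B (Python) =====
-- def find_corners_from_contour(polygon):
--     # One pass: track first argmin/argmax of (x+y) and (x-y) with strict comparisons,
--     # so the first extremal index wins exactly like Python's min/max.
--     x0, y0 = polygon[0][0][0], polygon[0][0][1]
--     s0, d0 = x0 + y0, x0 - y0
--     tl = br = bl = tr = 0
--     min_s = max_s = s0
--     min_d = max_d = d0
--     for i, pt in enumerate(polygon[1:], 1):
--         x, y = pt[0][0], pt[0][1]
--         s, d = x + y, x - y
--         if s < min_s:
--             min_s, tl = s, i
--         if max_s < s:
--             max_s, br = s, i
--         if d < min_d: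
--             min_d, bl = d, i
--         if max_d < d:
--             max_d, tr = d, i
--     return [polygon[tl][0], polygon[tr][0], polygon[br][0], polygon[bl][0]]
-- ===== Notes on version B (the rewrite author's own statement) =====
-- stated objective: alternative
-- what changed: Replaces four separate max/min passes over freshly built sum/diff lists with a single loop maintaining four (index, value) extremum trackers at once; it trades the library max/min calls for explicit strict-comparison updates.
import Mathlib
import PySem

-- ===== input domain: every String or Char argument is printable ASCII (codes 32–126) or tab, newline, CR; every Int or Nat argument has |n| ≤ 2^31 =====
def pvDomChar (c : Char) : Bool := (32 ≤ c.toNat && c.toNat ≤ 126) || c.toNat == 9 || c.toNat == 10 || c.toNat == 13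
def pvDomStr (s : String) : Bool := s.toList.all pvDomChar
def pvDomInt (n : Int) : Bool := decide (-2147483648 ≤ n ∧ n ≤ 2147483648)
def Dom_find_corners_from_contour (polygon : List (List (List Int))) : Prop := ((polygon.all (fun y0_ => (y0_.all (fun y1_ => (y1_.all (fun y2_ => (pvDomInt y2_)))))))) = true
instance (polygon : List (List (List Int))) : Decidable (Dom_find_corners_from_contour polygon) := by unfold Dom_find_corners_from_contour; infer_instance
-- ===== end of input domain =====

-- B replaces A's four max/min passes over freshly built sum/diff lists by one loop
-- maintaining four (index, value) extremum trackers (objective: alternative single-pass decomposition).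


-- shared access helpers: pt[0] and p[i]; exact on Pre_ (pyGet? = none is a Python IndexError,
-- excluded by Pre_; the .getD only supplies the return type)
def pvPt0 (pt : List (List Int)) : List Int := (PySem.List.pyGet? pt 0).getD []
def pvCoord (p : List Int) (i : Int) : Int := (PySem.List.pyGet? p i).getD 0

-- ===== PORT A =====
def find_corners_from_contour (polygon : List (List (List Int))) : List (List Int) :=
  let sums := polygon.map (fun pt => pvCoord (pvPt0 pt) 0 + pvCoord (pvPt0 pt) 1)
  let diffs := polygon.map (fun pt => pvCoord (pvPt0 pt) 0 - pvCoord (pvPt0 pt) 1)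
  let bottom_right := ((PySem.List.max? (PySem.List.enumerate sums 0) (fun p => p.2)).getD (0, 0)).1
  let top_left := ((PySem.List.min? (PySem.List.enumerate sums 0) (fun p => p.2)).getD (0, 0)).1
  let bottom_left := ((PySem.List.min? (PySem.List.enumerate diffs 0) (fun p => p.2)).getD (0, 0)).1
  let top_right := ((PySem.List.max? (PySem.List.enumerate diffs 0) (fun p => p.2)).getD (0, 0)).1
  [ pvPt0 ((PySem.List.pyGet? polygon top_left).getD []),
    pvPt0 ((PySem.List.pyGet? polygon top_right).getD []),
    pvPt0 ((PySem.List.pyGet? polygon bottom_right).getD []),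
    pvPt0 ((PySem.List.pyGet? polygon bottom_left).getD []) ]

-- ===== PORT B =====
-- state: (((tl, min_s), (br, max_s)), ((bl, min_d), (tr, max_d)))
def pvStateB := ((Int × Int) × (Int × Int)) × ((Int × Int) × (Int × Int))

def pvStepB (st : pvStateB) (e : Int × List (List Int)) : pvStateB :=
  let x := pvCoord (pvPt0 e.2) 0
  let y := pvCoord (pvPt0 e.2) 1
  let s := x + y
  let d := x - y
  ((if s < st.1.1.2 then (e.1, s) else st.1.1,
    if st.1.2.2 < s then (e.1, s) else st.1.2),
   (if d < st.2.1.2 then (e.1, d) else st.2.1,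
    if st.2.2.2 < d then (e.1, d) else st.2.2))

def find_corners_from_contour_alt (polygon : List (List (List Int))) : List (List Int) :=
  match polygon with
  | [] => []          -- unreachable under Pre_: Python B raises IndexError on an empty polygon
  | p0 :: rest =>
    let x0 := pvCoord (pvPt0 p0) 0
    let y0 := pvCoord (pvPt0 p0) 1
    let s0 := x0 + y0
    let d0 := x0 - y0
    let st := List.foldl pvStepB (((0, s0), (0, s0)), ((0, d0), (0, d0)))
                (PySem.List.enumerate rest 1)
    [ pvPt0 ((PySem.List.pyGet? polygon st.1.1.1).getD []),
      pvPt0 ((PySem.List.pyGet? polygon st.2.2.1).getD []),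
      pvPt0 ((PySem.List.pyGet? polygon st.1.2.1).getD []),
      pvPt0 ((PySem.List.pyGet? polygon st.2.1.1).getD []) ]

-- ===== PRECONDITION & SPEC =====
-- Pre_ excludes exactly the inputs where Python A raises: the empty polygon (max() on an
-- empty sequence is a ValueError) and any contour point pt with pt == [] or len(pt[0]) < 2
-- (pt[0][0]/pt[0][1] would be an IndexError).
def Pre_find_corners_from_contour (polygon : List (List (List Int))) : Prop :=
  polygon ≠ [] ∧ (polygon.all (fun pt => !pt.isEmpty && 2 ≤ (pt.headD []).length)) = true
instance (polygon : List (List (List Int))) : Decidable (Pre_find_corners_from_contour polygon) := by unfold Pre_find_corners_from_contour; infer_instance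

def pvWitness_find_corners_from_contour : List (List (List Int)) :=
  [[[0, 0]], [[4, 1]], [[1, 4]], [[5, 5]]]

def Spec_find_corners_from_contour (polygon : List (List (List Int))) (out : List (List Int)) : Prop := out = find_corners_from_contour_alt polygon
instance (polygon : List (List (List Int))) (out : List (List Int)) : Decidable (Spec_find_corners_from_contour polygon out) := by unfold Spec_find_corners_from_contour; infer_instance

-- ===== CLAIM (what is proved, stated in full; the proofs are below) =====
def Claim_equal_find_corners_from_contour : Prop := ∀ (polygon : List (List (List Int))), Dom_find_corners_from_contour polygon → Pre_find_corners_from_contour polygon → Spec_find_corners_from_contour polygon (find_corners_from_contour polygon)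

-- ===== LEMMAS AND PROOFS =====

-- Python max/min with a key over a nonempty list is a first-wins fold
lemma max?_key_cons {A K : Type} [LinearOrder K] (key : A -> K) (x : A) (t : List A) :
    PySem.List.max? (x :: t) key
      = some (List.foldl (fun m y => if key m < key y then y else m) x t) := by
  induction t generalizing x with
  | nil => rfl
  | cons h t ih =>
    have e1 : PySem.List.max? (x :: h :: t) key
        = PySem.List.max? ((if key x < key h then h else x) :: t) key := by
      simp only [PySem.List.max?, List.foldl_cons]
      split <;> rfl
    rw [e1, ih, List.foldl_cons]

lemma min?_key_cons {A K : Type} [LinearOrder K] (key : A -> K) (x : A) (t : List A) :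
    PySem.List.min? (x :: t) key
      = some (List.foldl (fun m y => if key y < key m then y else m) x t) := by
  induction t generalizing x with
  | nil => rfl
  | cons h t ih =>
    have e1 : PySem.List.min? (x :: h :: t) key
        = PySem.List.min? ((if key h < key x then h else x) :: t) key := by
      simp only [PySem.List.min?, List.foldl_cons]
      split <;> rfl
    rw [e1, ih, List.foldl_cons]

lemma enumerate_map {α β : Type} (f : α → β) (xs : List α) (s : Int) :
    PySem.List.enumerate (xs.map f) s
      = (PySem.List.enumerate xs s).map (fun p => (p.1, f p.2)) := by
  induction xs generalizing s with
  | nil => rfl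
  | cons h t ih => simp [PySem.List.enumerate_cons, ih]

-- A's keyed max over enumerate of a mapped list, as a first-wins fold
lemma argmaxA {α : Type} (g : α → Int) (p0 : α) (rest : List α) :
    (PySem.List.max? (PySem.List.enumerate ((p0 :: rest).map g) 0) (fun p => p.2)).getD (0, 0)
    = List.foldl (fun mm (p : Int × α) => if mm.2 < g p.2 then (p.1, g p.2) else mm)
        (0, g p0) (PySem.List.enumerate rest 1) := by
  rw [enumerate_map, PySem.List.enumerate_cons, List.map_cons, zero_add,
    max?_key_cons, Option.getD_some, List.foldl_map]
lemma argminA {α : Type} (g : α → Int) (p0 : α) (rest : List α) :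
    (PySem.List.min? (PySem.List.enumerate ((p0 :: rest).map g) 0) (fun p => p.2)).getD (0, 0)
    = List.foldl (fun mm (p : Int × α) => if g p.2 < mm.2 then (p.1, g p.2) else mm)
        (0, g p0) (PySem.List.enumerate rest 1) := by
  rw [enumerate_map, PySem.List.enumerate_cons, List.map_cons, zero_add,
    min?_key_cons, Option.getD_some, List.foldl_map]

-- B's combined fold splits into the four independent tracker folds
def pvGS (pt : List (List Int)) : Int := pvCoord (pvPt0 pt) 0 + pvCoord (pvPt0 pt) 1
def pvGD (pt : List (List Int)) : Int := pvCoord (pvPt0 pt) 0 - pvCoord (pvPt0 pt) 1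

lemma foldl_stepB (l : List (Int × List (List Int))) (a b c d : Int × Int) :
    List.foldl pvStepB ((a, b), (c, d)) l
    = ((List.foldl (fun mm p => if pvGS p.2 < mm.2 then (p.1, pvGS p.2) else mm) a l,
        List.foldl (fun mm p => if mm.2 < pvGS p.2 then (p.1, pvGS p.2) else mm) b l),
       (List.foldl (fun mm p => if pvGD p.2 < mm.2 then (p.1, pvGD p.2) else mm) c l,
        List.foldl (fun mm p => if mm.2 < pvGD p.2 then (p.1, pvGD p.2) else mm) d l)) := by
  induction l generalizing a b c d with
  | nil => rfl
  | cons h t ih =>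
    simp only [List.foldl_cons, pvStepB, pvGS, pvGD]
    exact ih _ _ _ _

-- ===== VERDICT (by name: the statement is the Claim_ definition above) =====
theorem find_corners_from_contour_spec : Claim_equal_find_corners_from_contour := by
  intro polygon _ hpre
  unfold Spec_find_corners_from_contour
  obtain ⟨hne, -⟩ := hpre
  match polygon with
  | [] => exact absurd rfl hne
  | p0 :: rest =>
    show find_corners_from_contour (p0 :: rest) = find_corners_from_contour_alt (p0 :: rest)
    unfold find_corners_from_contour find_corners_from_contour_alt
    simp only [foldl_stepB, pvGS, pvGD,
      argmaxA (fun pt => pvCoord (pvPt0 pt) 0 + pvCoord (pvPt0 pt) 1) p0 rest,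
      argminA (fun pt => pvCoord (pvPt0 pt) 0 + pvCoord (pvPt0 pt) 1) p0 rest,
      argmaxA (fun pt => pvCoord (pvPt0 pt) 0 - pvCoord (pvPt0 pt) 1) p0 rest,
      argminA (fun pt => pvCoord (pvPt0 pt) 0 - pvCoord (pvPt0 pt) 1) p0 rest]
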